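-- pv_equiv track=rewrite | github.com/Yeuoly/buuctf_re | SimpleRev/re.py | search
-- ===== SOURCE A (Python) =====
-- dest = 'killshadow'
--
-- charset = 'adsfkndcls'
--
-- def search(i):
--     t = ord(dest[i]) - 97
--     d = 0
--     while True:
--         c = t + 26 * d
--         ipt = c + 39 + ord(charset[i]) - 97
--         if ipt in range(ord('A'), ord('Z') + 1):
--             return chr(ipt)
--         d = d + 1
-- ===== SOURCE B (Python) =====
-- dest = 'killshadow'
--
-- charset = 'adsfkndcls'
--
-- def search(i):
--     # closed form: the unique letter in 'A'..'Z' congruent to the loop's base value mod 26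
--     base = ord(dest[i]) + ord(charset[i]) - 155
--     return chr(65 + (base - 65) % 26)
-- ===== Notes on version B (the rewrite author's own statement) =====
-- stated objective: simpler
-- what changed: Replaced the unbounded while-loop that shifts the computed code by alphabet-size steps until it lands in the uppercase range by a single closed-form modular expression on the summed character codes.
import Mathlib
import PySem

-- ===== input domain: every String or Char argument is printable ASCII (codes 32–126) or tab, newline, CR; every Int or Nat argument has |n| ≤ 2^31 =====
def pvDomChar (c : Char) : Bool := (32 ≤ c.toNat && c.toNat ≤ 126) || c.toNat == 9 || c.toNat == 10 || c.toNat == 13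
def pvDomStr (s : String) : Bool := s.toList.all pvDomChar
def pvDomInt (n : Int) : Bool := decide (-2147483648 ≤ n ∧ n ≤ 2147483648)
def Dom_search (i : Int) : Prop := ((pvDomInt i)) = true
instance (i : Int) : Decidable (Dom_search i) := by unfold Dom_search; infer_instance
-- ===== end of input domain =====

-- B replaces A's while-loop by a closed-form modular expression; equal wherever A returns.
-- ===== PORT A =====
def pvDest : List Char := ['k','i','l','l','s','h','a','d','o','w']
def pvCharset : List Char := ['a','d','s','f','k','n','d','c','l','s']

-- the while-loop of A, with fuel only to make it total (inside Pre_ it returns after few steps)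
def searchLoop (t cs : Int) : Nat → Int → String
  | 0, _ => ""
  | fuel+1, d =>
    let c := t + 26 * d
    let ipt := c + 39 + cs
    if 65 ≤ ipt ∧ ipt < 91 then String.ofList [Char.ofNat ipt.toNat] else searchLoop t cs fuel (d + 1)

def search (i : Int) : String :=
  match PySem.List.pyGet? pvDest i, PySem.List.pyGet? pvCharset i with
  | some dc, some cc => searchLoop ((dc.toNat : Int) - 97) ((cc.toNat : Int) - 97) 100 0
  | _, _ => ""

-- ===== PORT B =====
def search_alt (i : Int) : String :=
  match PySem.Str.pyGet? "killshadow" i with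
  | none => ""
  | some dc =>
    match PySem.Str.pyGet? "adsfkndcls" i with
    | none => ""
    | some cc =>
      let base := (dc.toNat : Int) + (cc.toNat : Int) - 155
      String.ofList [Char.ofNat (65 + PySem.Int.mod (base - 65) 26).toNat]

-- ===== PRECONDITION & SPEC =====
-- Pre_ excludes indices out of range of the module strings, where A raises IndexError.
def Pre_search (i : Int) : Prop := -10 ≤ i ∧ i < 10
instance (i : Int) : Decidable (Pre_search i) := by unfold Pre_search; infer_instance
def pvWitness_search : Int := 3
def Spec_search (i : Int) (out : String) : Prop := out = search_alt i
instance (i : Int) (out : String) : Decidable (Spec_search i out) := by unfold Spec_search; infer_instance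

-- ===== CLAIM =====
def Claim_equal_search : Prop := ∀ (i : Int), Dom_search i → Pre_search i → Spec_search i (search i)

-- ===== LEMMAS AND PROOFS =====

-- ===== VERDICT =====
theorem search_spec : Claim_equal_search := by
  intro i _ hpre
  obtain ⟨h1, h2⟩ := hpre
  unfold Spec_search
  interval_cases i <;> decide
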